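-- pv_equiv track=rewrite | github.com/oadotman/acs-clean | app/security/password_security.py | _contains_sequence
-- ===== SOURCE A (Python) =====
-- def _contains_sequence(password: str, pattern: str, min_length: int = 3) -> bool:
--     """Check if password contains a sequence from a pattern"""
--     for i in range(len(pattern) - min_length + 1):
--         sequence = pattern[i:i + min_length]
--         if sequence in password:
--             return True
--         # Check reverse
--         if sequence[::-1] in password:
--             return True
--     return False
-- ===== SOURCE B (Python) =====
-- def _contains_sequence(password: str, pattern: str, min_length: int = 3) -> bool:
--     """Rolling-hash filter over length-min_length windows, with exact verification."""
--     if min_length <= 0: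
--         # every window is the empty string, which is a substring of anything
--         return True
--     m = min_length
--     if m > len(pattern):
--         # no length-m window of pattern exists
--         return False
--     _BASE = 1000003
--     _MOD = 2305843009213693951
--     powm = pow(_BASE, m, _MOD)
--
--     def window_hashes(s):
--         """Rolling hash of every length-m window of s, left to right."""
--         out = []
--         h = 0
--         for idx in range(len(s)):
--             h = (h * _BASE + ord(s[idx])) % _MOD
--             if idx >= m:
--                 h = (h - ord(s[idx - m]) * powm) % _MOD
--             if idx >= m - 1:
--                 out.append(h)
--         return out
--
--     password_hashes = set(window_hashes(password))
--
--     def scan(s):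
--         """Does some length-m window of s occur in password? (hash filter + exact check)"""
--         for idx, h in enumerate(window_hashes(s)):
--             if h in password_hashes and s[idx:idx + m] in password:
--                 return True
--         return False
--
--     return scan(pattern) or scan(pattern[::-1])
-- ===== Notes on version B (the rewrite author's own statement) =====
-- stated objective: faster
-- what changed: B precomputes one rolling-hash set of the password's length-min_length windows and tests each pattern window (and each window of the reversed pattern) by hash lookup with an exact verification on a hit, instead of A's full substring scan of the password for every window.
import Mathlib
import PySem

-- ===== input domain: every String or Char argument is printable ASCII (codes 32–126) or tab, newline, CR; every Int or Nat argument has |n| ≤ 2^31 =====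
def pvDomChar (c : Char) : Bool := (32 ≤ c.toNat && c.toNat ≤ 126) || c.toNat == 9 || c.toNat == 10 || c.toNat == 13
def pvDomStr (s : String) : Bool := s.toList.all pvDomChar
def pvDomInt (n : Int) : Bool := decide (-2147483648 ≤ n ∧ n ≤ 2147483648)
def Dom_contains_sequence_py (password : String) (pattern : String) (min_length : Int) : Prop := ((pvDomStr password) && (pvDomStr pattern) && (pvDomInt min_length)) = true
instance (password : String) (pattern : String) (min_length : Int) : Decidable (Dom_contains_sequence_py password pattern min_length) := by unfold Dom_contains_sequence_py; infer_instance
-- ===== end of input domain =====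

-- B replaces A's per-window substring scan of the password by a rolling-hash filter over
-- length-min_length windows (one precomputed hash set of the password's windows, exact
-- verification on a hash hit), keeping O(|password|) extra memory.

-- ===== PORT A =====
-- the 'for i in range(...)' loop with its early returns, over the list of window starts
def pvALoop (pw pt : List Char) (m : Int) : List Int → Bool
  | [] => false
  | i :: rest =>
    -- sequence = pattern[i:i+min_length]
    if PySem.Chars.isIn (PySem.List.slice pt (some i) (some (i + m))) pw then true
    -- sequence[::-1]: reverse (PySem.List.slice?_none_none_neg_one)
    else if PySem.Chars.isIn (PySem.List.slice pt (some i) (some (i + m))).reverse pw then true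
    else pvALoop pw pt m rest

def contains_sequence_py (password : String) (pattern : String) (min_length : Int) : Bool :=
  pvALoop password.toList pattern.toList min_length
    (PySem.List.pyRange 0 ((pattern.toList.length : Int) - min_length + 1))

-- ===== PORT B =====
def pvBase : Int := 1000003
def pvMod : Int := 2305843009213693951

-- body of window_hashes' 'for idx in range(len(s))' loop; state = (h, out)
-- (s[idx] and s[idx - m] are always in range where the step reads them)
def pvWHStep (s : List Char) (m powm : Int) (st : Int × List Int) (idx : Int) : Int × List Int :=
  let h1 := PySem.Int.mod (st.1 * pvBase + ((PySem.List.pyGetD s idx ' ').toNat : Int)) pvMod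
  let h2 := if m ≤ idx then
      PySem.Int.mod (h1 - ((PySem.List.pyGetD s (idx - m) ' ').toNat : Int) * powm) pvMod
    else h1
  (h2, if m - 1 ≤ idx then st.2 ++ [h2] else st.2)

-- window_hashes(s): rolling hash of every length-m window of s, left to right
def pvWindowHashes (s : List Char) (m powm : Int) : List Int :=
  ((PySem.List.pyRange 0 (s.length : Int)).foldl (pvWHStep s m powm) (0, [])).2

-- scan(s): 'for idx, h in enumerate(window_hashes(s))' with early return
def pvScanLoop (pw s : List Char) (m : Int) (hset : PySem.Set Int) : List (Int × Int) → Bool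
  | [] => false
  | (idx, h) :: rest =>
    if PySem.Set.contains hset h &&
        PySem.Chars.isIn (PySem.List.slice s (some idx) (some (idx + m))) pw then true
    else pvScanLoop pw s m hset rest

def contains_sequence_py_alt (password : String) (pattern : String) (min_length : Int) : Bool :=
  if min_length ≤ 0 then true
  else if (pattern.toList.length : Int) < min_length then false
  else
    let powm := PySem.Int.powMod pvBase min_length.toNat pvMod
    let hset : PySem.Set Int :=
      PySem.Set.ofList (pvWindowHashes password.toList min_length powm)
    (pvScanLoop password.toList pattern.toList min_length hset
        (PySem.List.enumerate (pvWindowHashes pattern.toList min_length powm)) ||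
      pvScanLoop password.toList pattern.toList.reverse min_length hset
        (PySem.List.enumerate (pvWindowHashes pattern.toList.reverse min_length powm)))

-- ===== PRECONDITION & SPEC =====
def Spec_contains_sequence_py (password : String) (pattern : String) (min_length : Int) (out : Bool) : Prop := out = contains_sequence_py_alt password pattern min_length
instance (password : String) (pattern : String) (min_length : Int) (out : Bool) : Decidable (Spec_contains_sequence_py password pattern min_length out) := by unfold Spec_contains_sequence_py; infer_instance

-- ===== CLAIM (what is proved, stated in full; the proofs are below) =====
def Claim_equal_contains_sequence_py : Prop := ∀ (password : String) (pattern : String) (min_length : Int), Dom_contains_sequence_py password pattern min_length → Spec_contains_sequence_py password pattern min_length (contains_sequence_py password pattern min_length)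

-- ===== LEMMAS AND PROOFS =====

theorem pvModPos : (0 : Int) < pvMod := by norm_num [pvMod]

theorem pvRange_nil {a b : Int} (h : b ≤ a) : PySem.List.pyRange a b = [] :=
  List.eq_nil_iff_forall_not_mem.mpr (fun x hx => by
    rw [PySem.List.mem_pyRange_one] at hx; omega)

-- A's early-return loop is an 'any' over the window starts
theorem pvALoop_eq_any (pw pt : List Char) (m : Int) (l : List Int) :
    pvALoop pw pt m l = l.any (fun i =>
      PySem.Chars.isIn (PySem.List.slice pt (some i) (some (i + m))) pw ||
      PySem.Chars.isIn (PySem.List.slice pt (some i) (some (i + m))).reverse pw) := by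
  induction l with
  | nil => rfl
  | cons i rest ih =>
    rw [List.any_cons, ← ih]
    simp only [pvALoop]
    cases PySem.Chars.isIn (PySem.List.slice pt (some i) (some (i + m))) pw <;>
      cases PySem.Chars.isIn (PySem.List.slice pt (some i) (some (i + m))).reverse pw <;> simp

-- a list of length n is a substring of pw iff it is one of pw's length-n windows
theorem mem_windows_iff_isIn (pw t : List Char) (n : Nat) (hn : 1 ≤ n) (ht : t.length = n) :
    (t ∈ (PySem.List.pyRange 0 ((pw.length : Int) - (n : Int) + 1)).map
        (fun j => PySem.List.slice pw (some j) (some (j + (n : Int))))) ↔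
      PySem.Chars.isIn t pw = true := by
  constructor
  · intro h
    rw [List.mem_map] at h
    obtain ⟨j, hj, hslice⟩ := h
    rw [PySem.List.mem_pyRange_one] at hj
    obtain ⟨j0, rfl⟩ : ∃ j0 : Nat, j = (j0 : Int) := ⟨j.toNat, (Int.toNat_of_nonneg hj.1).symm⟩
    rw [PySem.List.slice_natCast_add] at hslice
    rw [← PySem.Chars.exists_prefix_drop_iff_isIn]
    exact ⟨j0, hslice ▸ List.take_prefix n (pw.drop j0)⟩
  · intro h
    rw [← PySem.Chars.exists_prefix_drop_iff_isIn] at h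
    obtain ⟨j, hpre⟩ := h
    have hlen : n ≤ pw.length - j := by
      have := hpre.length_le
      simpa [ht] using this
    have hj2 : j + n ≤ pw.length := by omega
    refine List.mem_map.mpr ⟨(j : Int), ?_, ?_⟩
    · rw [PySem.List.mem_pyRange_one]
      constructor <;> omega
    · rw [PySem.List.slice_natCast_add]
      have := List.prefix_iff_eq_take.mp hpre
      rw [ht] at this
      exact this.symm

-- direct (non-rolling) reference hashes, used only in the proofs
def pvPH (l : List Char) : Int := l.foldl (fun h c => h * pvBase + (c.toNat : Int)) 0
def pvHash (l : List Char) : Int := l.foldl (fun h c => (h * pvBase + (c.toNat : Int)) % pvMod) 0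

theorem pvPH_from (l : List Char) : ∀ h : Int,
    l.foldl (fun a c => a * pvBase + (c.toNat : Int)) h = h * pvBase ^ l.length + pvPH l := by
  induction l with
  | nil => intro h; simp [pvPH]
  | cons c t ih =>
    intro h
    simp only [List.foldl_cons, List.length_cons, pvPH]
    rw [ih, ih ((0 : Int) * pvBase + (c.toNat : Int))]
    ring

theorem pvHash_eq_mod (l : List Char) : ∀ h : Int,
    l.foldl (fun a c => (a * pvBase + (c.toNat : Int)) % pvMod) (h % pvMod) =
      (l.foldl (fun a c => a * pvBase + (c.toNat : Int)) h) % pvMod := by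
  induction l with
  | nil => intro h; simp
  | cons c t ih =>
    intro h
    simp only [List.foldl_cons]
    have key : (h % pvMod * pvBase + (c.toNat : Int)) % pvMod =
        (h * pvBase + (c.toNat : Int)) % pvMod := by
      conv_rhs => rw [Int.add_emod, Int.mul_emod]
      rw [Int.add_emod, Int.mul_emod (h % pvMod), Int.emod_emod_of_dvd _ dvd_rfl]
    rw [key, ih]

theorem pvHash_eq (l : List Char) : pvHash l = pvPH l % pvMod := by
  have h := pvHash_eq_mod l 0
  simpa [pvHash, pvPH] using h

theorem pvHash_append (l : List Char) (c : Char) :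
    pvHash (l ++ [c]) = (pvHash l * pvBase + (c.toNat : Int)) % pvMod := by
  simp [pvHash, List.foldl_append]

theorem pvHash_cons_expand (x : Char) (t : List Char) :
    pvHash (x :: t) = (((x.toNat : Int)) * pvBase ^ t.length + pvPH t) % pvMod := by
  have h1 : pvHash (x :: t) = t.foldl (fun a c => (a * pvBase + (c.toNat : Int)) % pvMod)
      (((0 : Int) * pvBase + (x.toNat : Int)) % pvMod) := rfl
  rw [h1, pvHash_eq_mod, pvPH_from]
  ring_nf

theorem pvALG (x : Char) (t : List Char) (mt : Nat) (h : t.length = mt) :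
    (pvHash (x :: t) - ((x.toNat : Int)) * ((pvBase ^ mt) % pvMod)) % pvMod = pvHash t := by
  rw [pvHash_cons_expand, h, pvHash_eq]
  have key : ∀ a b : Int,
      (a % pvMod - (x.toNat : Int) * (b % pvMod)) % pvMod = (a - (x.toNat : Int) * b) % pvMod := by
    intro a b
    conv_rhs => rw [Int.sub_emod, Int.mul_emod]
    rw [Int.sub_emod, Int.mul_emod ((x.toNat : Int)) (b % pvMod),
      Int.emod_emod_of_dvd _ dvd_rfl, Int.emod_emod_of_dvd _ dvd_rfl]
  rw [key]
  ring_nf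

-- sliding the window one step right, as a list identity
theorem pvStepWindow (s : List Char) (n mt : Nat) (hmt : 1 ≤ mt) (hmtn : mt ≤ n)
    (hlt : n < s.length) :
    (s.drop (n - mt)).take mt ++ [s[n]'hlt] =
      (s[n - mt]'(by omega)) :: (s.drop (n + 1 - mt)).take mt := by
  have e1 : (s.drop (n - mt)).take (mt + 1) = (s.drop (n - mt)).take mt ++ [s[n]'hlt] := by
    rw [List.take_add_one]
    have hq : (s.drop (n - mt))[mt]? = some (s[n]'hlt) := by
      rw [List.getElem?_eq_getElem (by simp only [List.length_drop]; omega)]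
      have hidx : n - mt + mt = n := by omega
      simp [List.getElem_drop, hidx]
    rw [hq]
    rfl
  have e2 : (s.drop (n - mt)).take (mt + 1) =
      (s[n - mt]'(by omega)) :: (s.drop (n + 1 - mt)).take mt := by
    rw [List.drop_eq_getElem_cons (l := s) (i := n - mt) (by omega), List.take_succ_cons]
    have : n - mt + 1 = n + 1 - mt := by omega
    rw [this]
  rw [← e1, e2]

-- the rolling loop's invariant: h is the hash of the (≤ m)-window ending at n,
-- out is the list of hashes of all complete windows so far
theorem pvWH_inv (s : List Char) (m : Int) (hm : 1 ≤ m) (n : Nat) (hn : n ≤ s.length) :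
    (PySem.List.pyRange 0 (n : Int)).foldl
        (pvWHStep s m (PySem.Int.powMod pvBase m.toNat pvMod)) (0, []) =
      (pvHash ((s.drop (n - m.toNat)).take (min n m.toNat)),
       (PySem.List.pyRange 0 ((n : Int) - m + 1)).map
         (fun j => pvHash (PySem.List.slice s (some j) (some (j + m))))) := by
  induction n with
  | zero =>
    rw [show ((0 : Nat) : Int) = 0 by simp, pvRange_nil (le_refl 0),
      pvRange_nil (by omega : (0 : Int) - m + 1 ≤ 0)]
    simp [pvHash]
  | succ n ih =>
    have hn' : n ≤ s.length := by omega
    have hlt : n < s.length := by omega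
    rw [show ((n + 1 : Nat) : Int) = (n : Int) + 1 by push_cast; ring,
      PySem.List.pyRange_one_succ_right (by positivity), List.foldl_append, ih hn']
    simp only [List.foldl_cons, List.foldl_nil, pvWHStep]
    have hget : PySem.List.pyGetD s ((n : Int)) ' ' = s[n]'hlt := by
      rw [PySem.List.pyGetD_eq_getElem s ' ' (by positivity) (by exact_mod_cast hlt)]
      simp
    rw [hget]
    by_cases hcase : m ≤ (n : Int)
    · -- full window: trim the oldest character
      have hmtn : m.toNat ≤ n := by omega
      have hmt1 : 1 ≤ m.toNat := by omega
      have hget2 : PySem.List.pyGetD s ((n : Int) - m) ' ' = s[n - m.toNat]'(by omega) := by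
        rw [show (n : Int) - m = ((n - m.toNat : Nat) : Int) by omega,
          PySem.List.pyGetD_eq_getElem s ' ' (by positivity)
            (by exact_mod_cast (show n - m.toNat < s.length by omega))]
        simp
      have hpowm : PySem.Int.powMod pvBase m.toNat pvMod = (pvBase ^ m.toNat) % pvMod := by
        simp [PySem.Int.powMod, PySem.Int.mod_eq_emod_of_pos pvModPos]
      rw [if_pos hcase, if_pos (show m - 1 ≤ (n : Int) by omega), hget2, hpowm,
        Nat.min_eq_right hmtn, Nat.min_eq_right (show m.toNat ≤ n + 1 by omega)]
      simp only [PySem.Int.mod_eq_emod_of_pos pvModPos]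
      rw [← pvHash_append, pvStepWindow s n m.toNat hmt1 hmtn hlt,
        pvALG _ _ m.toNat (by simp only [List.length_take, List.length_drop]; omega)]
      have hsl : PySem.List.slice s (some ((n : Int) - m + 1)) (some (((n : Int) - m + 1) + m)) =
          (s.drop (n + 1 - m.toNat)).take m.toNat := by
        rw [show ((n : Int) - m + 1) = ((n + 1 - m.toNat : Nat) : Int) by omega,
          show ((n + 1 - m.toNat : Nat) : Int) + m =
            ((n + 1 - m.toNat : Nat) : Int) + ((m.toNat : Nat) : Int) by omega]
        exact PySem.List.slice_natCast_add s _ _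
      have hout : (PySem.List.pyRange 0 ((n : Int) + 1 - m + 1)).map
            (fun j => pvHash (PySem.List.slice s (some j) (some (j + m)))) =
          (PySem.List.pyRange 0 ((n : Int) - m + 1)).map
            (fun j => pvHash (PySem.List.slice s (some j) (some (j + m)))) ++
            [pvHash ((s.drop (n + 1 - m.toNat)).take m.toNat)] := by
        rw [show ((n : Int) + 1 - m + 1) = ((n : Int) - m + 1) + 1 by ring,
          PySem.List.pyRange_one_succ_right (by omega), List.map_append]
        simp only [List.map_cons, List.map_nil]
        rw [hsl]
      rw [hout]
    · -- growing prefix window: no trim yet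
      have hnm : n < m.toNat := by omega
      rw [if_neg hcase, Nat.sub_eq_zero_of_le (by omega : n ≤ m.toNat),
        Nat.sub_eq_zero_of_le (by omega : n + 1 ≤ m.toNat), List.drop_zero,
        Nat.min_eq_left (by omega : n ≤ m.toNat), Nat.min_eq_left (by omega : n + 1 ≤ m.toNat)]
      simp only [PySem.Int.mod_eq_emod_of_pos pvModPos]
      have htake : s.take (n + 1) = s.take n ++ [s[n]'hlt] := by
        rw [List.take_add_one]
        rw [List.getElem?_eq_getElem hlt]
        rfl
      rw [← pvHash_append, ← htake]
      by_cases hc2 : m - 1 ≤ (n : Int)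
      · -- this is the first complete window
        have hmt1 : m.toNat = n + 1 := by omega
        rw [if_pos hc2]
        simp only [Prod.mk.injEq]
        refine ⟨by first | rfl | trivial, ?_⟩
        rw [pvRange_nil (by omega : (n : Int) - m + 1 ≤ 0),
          show ((n : Int) + 1 - m + 1) = 1 by omega,
          PySem.List.pyRange_one_cons (by norm_num : (0 : Int) < 1)]
        rw [show (0 : Int) + 1 = 1 by ring, pvRange_nil (le_refl (1 : Int))]
        simp only [List.map_nil, List.map_cons, List.nil_append]
        have hsl : PySem.List.slice s (some (0 : Int)) (some ((0 : Int) + m)) = s.take (n + 1) := by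
          rw [zero_add, PySem.List.slice_zero_start, PySem.List.slice_to s (by omega : (0 : Int) ≤ m)]
          rw [show m.toNat = n + 1 from hmt1]
        rw [hsl]
      · -- no complete window yet
        rw [if_neg hc2, pvRange_nil (by omega : (n : Int) - m + 1 ≤ 0),
          pvRange_nil (by omega : (n : Int) + 1 - m + 1 ≤ 0)]

theorem pvWindowHashes_eq (s : List Char) (m : Int) (hm : 1 ≤ m) :
    pvWindowHashes s m (PySem.Int.powMod pvBase m.toNat pvMod) =
      (PySem.List.pyRange 0 ((s.length : Int) - m + 1)).map
        (fun j => pvHash (PySem.List.slice s (some j) (some (j + m)))) := by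
  unfold pvWindowHashes
  rw [pvWH_inv s m hm s.length le_rfl]

theorem pvScanLoop_eq_any (pw s : List Char) (m : Int) (hset : PySem.Set Int)
    (ps : List (Int × Int)) :
    pvScanLoop pw s m hset ps = ps.any (fun p =>
      PySem.Set.contains hset p.2 &&
      PySem.Chars.isIn (PySem.List.slice s (some p.1) (some (p.1 + m))) pw) := by
  induction ps with
  | nil => rfl
  | cons p rest ih =>
    obtain ⟨idx, h⟩ := p
    rw [List.any_cons, ← ih]
    simp only [pvScanLoop]
    cases PySem.Set.contains hset h &&
        PySem.Chars.isIn (PySem.List.slice s (some idx) (some (idx + m))) pw <;> simp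

-- one scan = 'some window of s occurs in pw', because verification makes the filter exact
theorem pvScan_eq (pw s : List Char) (m : Int) (hm : 1 ≤ m) :
    pvScanLoop pw s m
        (PySem.Set.ofList (pvWindowHashes pw m (PySem.Int.powMod pvBase m.toNat pvMod)))
        (PySem.List.enumerate (pvWindowHashes s m (PySem.Int.powMod pvBase m.toNat pvMod))) =
      (PySem.List.pyRange 0 ((s.length : Int) - m + 1)).any
        (fun i => PySem.Chars.isIn (PySem.List.slice s (some i) (some (i + m))) pw) := by
  rw [pvScanLoop_eq_any, pvWindowHashes_eq s m hm]
  by_cases hc : (s.length : Int) - m + 1 ≤ 0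
  · rw [pvRange_nil hc]
    simp
  · obtain ⟨nw, hnw⟩ : ∃ k : Nat, (s.length : Int) - m + 1 = (k : Int) :=
      ⟨((s.length : Int) - m + 1).toNat, by omega⟩
    rw [hnw]
    rw [PySem.List.enumerate_eq_map_pyRange _ (0 : Int)]
    have hlen : PySem.List.len ((PySem.List.pyRange 0 (nw : Int)).map
        (fun j => pvHash (PySem.List.slice s (some j) (some (j + m))))) = (nw : Int) := by
      simp [PySem.List.len]
    rw [hlen, List.any_map]
    apply PySem.List.any_congr_mem
    intro j hj
    rw [PySem.List.mem_pyRange_one] at hj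
    obtain ⟨k, rfl⟩ : ∃ k : Nat, j = (k : Int) := ⟨j.toNat, (Int.toNat_of_nonneg hj.1).symm⟩
    have hklt : k < nw := by omega
    simp only [Function.comp]
    rw [PySem.List.pyGetD_map_pyRange _ nw k _ hklt]
    obtain ⟨mt, hmt⟩ : ∃ mt : Nat, m = (mt : Int) := ⟨m.toNat, by omega⟩
    have hksm : k + mt ≤ s.length := by omega
    have hw : PySem.List.slice s (some (k : Int)) (some ((k : Int) + m)) = (s.drop k).take mt := by
      rw [hmt]; exact PySem.List.slice_natCast_add s k mt
    cases hIn : PySem.Chars.isIn (PySem.List.slice s (some (k : Int)) (some ((k : Int) + m))) pw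
    · simp
    · have hlenw : ((s.drop k).take mt).length = mt := by
        simp only [List.length_take, List.length_drop]
        omega
      have hmem : (s.drop k).take mt ∈
          (PySem.List.pyRange 0 ((pw.length : Int) - (mt : Int) + 1)).map
            (fun j => PySem.List.slice pw (some j) (some (j + (mt : Int)))) := by
        apply (mem_windows_iff_isIn pw _ mt (by omega) hlenw).mpr
        rw [← hw]; exact hIn
      obtain ⟨j0, hj0, hw0⟩ := List.mem_map.mp hmem
      have hx : pvHash ((s.drop k).take mt) ∈
          PySem.Set.ofList (pvWindowHashes pw m (PySem.Int.powMod pvBase m.toNat pvMod)) := by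
        rw [PySem.Set.mem_ofList, pvWindowHashes_eq pw m hm, hmt]
        exact List.mem_map.mpr ⟨j0, hj0, by rw [hw0]⟩
      have hcont : PySem.Set.contains
          (PySem.Set.ofList (pvWindowHashes pw m (PySem.Int.powMod pvBase m.toNat pvMod)))
          (pvHash ((s.drop k).take mt)) = true := by
        simpa [PySem.Set.contains] using hx
      rw [hw, hcont]
      simp

theorem pvSlice_reverse (s : List Char) (mt k : Nat) (hk : k + mt ≤ s.length) :
    PySem.List.slice s.reverse (some (k : Int)) (some ((k : Int) + (mt : Int))) =
      ((s.drop (s.length - mt - k)).take mt).reverse := by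
  rw [PySem.List.slice_natCast_add, List.drop_reverse, List.take_reverse, List.drop_take]
  have h1 : (List.take (s.length - k) s).length = s.length - k := by
    simp [List.length_take]
  rw [h1]
  have h2 : s.length - k - (s.length - k - mt) = mt := by omega
  rw [h2, Nat.sub_sub, Nat.sub_sub, Nat.add_comm k mt]

-- windows of the reversed string are the reversed windows
theorem pvAny_reverse (pw s : List Char) (m : Int) (hm : 1 ≤ m) :
    (PySem.List.pyRange 0 ((s.length : Int) - m + 1)).any
        (fun i => PySem.Chars.isIn (PySem.List.slice s.reverse (some i) (some (i + m))) pw) =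
      (PySem.List.pyRange 0 ((s.length : Int) - m + 1)).any
        (fun i => PySem.Chars.isIn (PySem.List.slice s (some i) (some (i + m))).reverse pw) := by
  obtain ⟨mt, hmt⟩ : ∃ mt : Nat, m = (mt : Int) := ⟨m.toNat, by omega⟩
  rw [Bool.eq_iff_iff]
  simp only [List.any_eq_true]
  constructor
  · rintro ⟨x, hx, hpx⟩
    rw [PySem.List.mem_pyRange_one] at hx
    obtain ⟨k, rfl⟩ : ∃ k : Nat, x = (k : Int) := ⟨x.toNat, (Int.toNat_of_nonneg hx.1).symm⟩
    have hk : k + mt ≤ s.length := by omega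
    rw [hmt, pvSlice_reverse s mt k hk] at hpx
    refine ⟨((s.length - mt - k : Nat) : Int), ?_, ?_⟩
    · rw [PySem.List.mem_pyRange_one]
      constructor
      · positivity
      · omega
    · have he : PySem.List.slice s (some ((s.length - mt - k : Nat) : Int))
          (some (((s.length - mt - k : Nat) : Int) + m)) =
          (s.drop (s.length - mt - k)).take mt := by
        rw [hmt]; exact PySem.List.slice_natCast_add s _ mt
      rw [he]
      exact hpx
  · rintro ⟨x, hx, hpx⟩
    rw [PySem.List.mem_pyRange_one] at hx
    obtain ⟨k, rfl⟩ : ∃ k : Nat, x = (k : Int) := ⟨x.toNat, (Int.toNat_of_nonneg hx.1).symm⟩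
    have hk : k + mt ≤ s.length := by omega
    have hwk : PySem.List.slice s (some (k : Int)) (some ((k : Int) + m)) =
        (s.drop k).take mt := by
      rw [hmt]; exact PySem.List.slice_natCast_add s k mt
    rw [hwk] at hpx
    refine ⟨((s.length - mt - k : Nat) : Int), ?_, ?_⟩
    · rw [PySem.List.mem_pyRange_one]
      constructor
      · positivity
      · omega
    · have hj : (s.length - mt - k) + mt ≤ s.length := by omega
      rw [hmt, pvSlice_reverse s mt (s.length - mt - k) hj]
      have hkk : s.length - mt - (s.length - mt - k) = k := by omega
      rw [hkk]
      exact hpx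

theorem pvAny_or (l : List Int) (p q : Int → Bool) :
    (l.any fun x => p x || q x) = (l.any p || l.any q) := by
  rw [Bool.eq_iff_iff]
  simp only [List.any_eq_true, Bool.or_eq_true]
  exact ⟨fun ⟨x, hx, h⟩ => h.elim (fun h => Or.inl ⟨x, hx, h⟩) (fun h => Or.inr ⟨x, hx, h⟩),
    fun h => h.elim (fun ⟨x, hx, h⟩ => ⟨x, hx, Or.inl h⟩) (fun ⟨x, hx, h⟩ => ⟨x, hx, Or.inr h⟩)⟩

-- ===== VERDICT (by name: the statement is the Claim_ definition above) =====
theorem contains_sequence_py_spec : Claim_equal_contains_sequence_py := by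
  intro password pattern m _hdom
  unfold Spec_contains_sequence_py contains_sequence_py contains_sequence_py_alt
  rw [pvALoop_eq_any]
  by_cases hm : m ≤ 0
  · rw [if_pos hm]
    apply List.any_eq_true.mpr
    refine ⟨-m, ?_, ?_⟩
    · rw [PySem.List.mem_pyRange_one]
      have : (0 : Int) ≤ (pattern.toList.length : Int) := by positivity
      constructor <;> omega
    · have hz : PySem.List.slice pattern.toList (some (-m)) (some (-m + m)) = [] := by
        have h0 : -m + m = (0 : Int) := by ring
        rw [h0, PySem.List.slice_toNat pattern.toList (by omega) le_rfl]
        simp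
      rw [hz]
      simp [PySem.Chars.isIn_nil]
  · rw [if_neg hm]
    have hm1 : 1 ≤ m := by omega
    by_cases hp : (pattern.toList.length : Int) < m
    · rw [if_pos hp, pvRange_nil (by omega : (pattern.toList.length : Int) - m + 1 ≤ 0)]
      rfl
    · rw [if_neg hp]
      simp only []
      rw [pvScan_eq password.toList pattern.toList m hm1,
        pvScan_eq password.toList pattern.toList.reverse m hm1,
        List.length_reverse, pvAny_reverse password.toList pattern.toList m hm1,
        ← pvAny_or]
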